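-- pv_equiv track=rewrite | github.com/phanstudio/python-work | dialog.py | _error
-- ===== SOURCE A (Python) =====
-- def _error(type, check):
--     message = ""
--     numericals = [0,1,2,3,4,5,6,7,8,9]
--     if type == "space":
--         if " " in check:
--             message = "Pls remove all spaces, try again"
--     if type == "numerical":
--         for num in numericals:
--             if str(num) in check:
--                 message = "Pls remove all the numbers, try again"
--                 break
--     if type == "numb":
--         try:
--             int(check)
--         except:
--             message = "Pls only write numbers"
--     return message
-- ===== SOURCE B (Python) =====
-- def _is_int(s):
--     try:
--         int(s)
--         return True
--     except ValueError:
--         return False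
--
-- def _error(type, check):
--     # one pass over check collecting character-class facts
--     has_space = False
--     has_digit = False
--     for c in check:
--         has_space = has_space or c == " "
--         has_digit = has_digit or c in "0123456789"
--     # table dispatch: type -> (flag, message)
--     table = {
--         "space": (has_space, "Pls remove all spaces, try again"),
--         "numerical": (has_digit, "Pls remove all the numbers, try again"),
--         "numb": (not _is_int(check), "Pls only write numbers"),
--     }
--     flag, msg = table.get(type, (False, ""))
--     return msg if flag else ""
-- ===== Notes on version B (the rewrite author's own statement) =====
-- stated objective: alternative
-- what changed: Replaces A's branch chain and per-digit substring-search loop by one character pass over check that accumulates has_space/has_digit flags, followed by a table (dict) dispatch mapping type to (flag, message).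
import Mathlib
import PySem

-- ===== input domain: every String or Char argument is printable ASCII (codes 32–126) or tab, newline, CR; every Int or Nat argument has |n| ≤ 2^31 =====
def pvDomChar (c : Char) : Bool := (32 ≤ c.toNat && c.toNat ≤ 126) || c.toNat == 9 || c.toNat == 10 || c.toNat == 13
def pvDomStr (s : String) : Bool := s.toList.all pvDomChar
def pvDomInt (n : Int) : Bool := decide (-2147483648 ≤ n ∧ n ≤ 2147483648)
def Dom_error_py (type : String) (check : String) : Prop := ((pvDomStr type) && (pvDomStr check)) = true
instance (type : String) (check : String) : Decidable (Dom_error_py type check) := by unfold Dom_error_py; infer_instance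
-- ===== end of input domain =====

-- B replaces A's branch chain and per-digit substring loop by one character pass accumulating has_space/has_digit flags plus a table (dict) dispatch (alternative decomposition).


-- ===== PORT A =====
-- the 'for num in numericals: if str(num) in check: message = …; break' loop
def errLoopA (check : String) : List Int → String → String
  | [], m => m
  | n :: ns, m =>
    if PySem.Str.isIn (PySem.Int.toStr n) check then
      "Pls remove all the numbers, try again"
    else errLoopA check ns m

def error_py (type : String) (check : String) : String :=
  let message := ""
  let numericals : List Int := [0,1,2,3,4,5,6,7,8,9]
  let message := if type == "space" then
      (if PySem.Str.isIn " " check then "Pls remove all spaces, try again" else message)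
    else message
  let message := if type == "numerical" then errLoopA check numericals message else message
  let message := if type == "numb" then
      (match PySem.Int.ofStr? check with   -- try: int(check) / except → message
       | some _ => message
       | none => "Pls only write numbers")
    else message
  message

-- ===== PORT B =====
-- helper _is_int: int(s) succeeds?
def bIsInt (s : String) : Bool := (PySem.Int.ofStr? s).isSome

def error_py_alt (type : String) (check : String) : String :=
  -- one pass over check collecting character-class facts
  let flags := check.toList.foldl
    (fun (st : Bool × Bool) c =>
      (st.1 || (c == ' '), st.2 || ("0123456789".toList).contains c))
    (false, false)
  -- table dispatch: type -> (flag, message)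
  let table : PySem.Dict String (Bool × String) := PySem.Dict.ofList
    [("space", (flags.1, "Pls remove all spaces, try again")),
     ("numerical", (flags.2, "Pls remove all the numbers, try again")),
     ("numb", (!bIsInt check, "Pls only write numbers"))]
  let fm := table.getD type (false, "")
  if fm.1 then fm.2 else ""

-- ===== PRECONDITION & SPEC =====
def Spec_error_py (type : String) (check : String) (out : String) : Prop := out = error_py_alt type check
instance (type : String) (check : String) (out : String) : Decidable (Spec_error_py type check out) := by unfold Spec_error_py; infer_instance

-- ===== CLAIM (what is proved, stated in full; the proofs are below) =====
def Claim_equal_error_py : Prop := ∀ (type : String) (check : String), Dom_error_py type check → Spec_error_py type check (error_py type check)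

-- ===== LEMMAS AND PROOFS =====

theorem isIn_singleton (c : Char) (s : String) :
    PySem.Str.isIn (String.ofList [c]) s = s.toList.contains c := by
  rw [Bool.eq_iff_iff, PySem.Str.isIn_iff_infix]
  simp only [String.toList_ofList, List.contains_iff_mem]
  constructor
  · intro h; exact h.subset (by simp)
  · intro h
    obtain ⟨u, v, he⟩ := List.append_of_mem h
    exact ⟨u, v, by simp [he]⟩

theorem isIn_digit (n : Int) (c : Char) (h : PySem.Int.toStr n = String.ofList [c])
    (check : String) :
    PySem.Str.isIn (PySem.Int.toStr n) check = check.toList.contains c := by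
  rw [h]; exact isIn_singleton c check

theorem errLoopA_eq (check : String) (ns : List Int) (m : String) :
    errLoopA check ns m =
      if ns.any (fun n => PySem.Str.isIn (PySem.Int.toStr n) check) then
        "Pls remove all the numbers, try again" else m := by
  induction ns with
  | nil => simp [errLoopA]
  | cons n ns ih =>
    rw [errLoopA, ih, List.any_cons]
    by_cases h : PySem.Chars.isIn (PySem.Int.toChars n) check.toList = true <;>
      simp [PySem.Str.isIn, h]

-- the one-pass fold computes (contains ' ', any digit)
theorem flags_eq (l : List Char) (a b : Bool) :
    l.foldl (fun (st : Bool × Bool) c =>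
        (st.1 || (c == ' '), st.2 || ("0123456789".toList).contains c)) (a, b) =
      (a || l.contains ' ', b || l.any (fun c => ("0123456789".toList).contains c)) := by
  induction l generalizing a b with
  | nil => simp
  | cons c cs ih =>
    simp only [List.foldl_cons, ih, List.any_cons, List.contains_cons, Prod.mk.injEq]
    have hc : (c == ' ') = (' ' == c) := by
      by_cases hch : c = ' '
      · simp [hch]
      · simp [hch, Ne.symm hch]
    refine ⟨by rw [hc, Bool.or_assoc], by rw [Bool.or_assoc]⟩

theorem any_swap (l d : List Char) :
    l.any (fun c => d.contains c) = d.any (fun c => l.contains c) := by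
  rw [Bool.eq_iff_iff]
  simp [List.any_eq_true]
  exact ⟨fun ⟨c, h1, h2⟩ => ⟨c, h2, h1⟩, fun ⟨c, h1, h2⟩ => ⟨c, h2, h1⟩⟩

theorem numerical_branch (check : String) (m : String) :
    errLoopA check [0,1,2,3,4,5,6,7,8,9] m =
      if check.toList.any (fun c => ("0123456789".toList).contains c) then
        "Pls remove all the numbers, try again" else m := by
  rw [errLoopA_eq, any_swap]
  congr 1
  simp only [List.any_cons, List.any_nil,
    isIn_digit 0 '0' (by decide) check, isIn_digit 1 '1' (by decide) check,
    isIn_digit 2 '2' (by decide) check, isIn_digit 3 '3' (by decide) check,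
    isIn_digit 4 '4' (by decide) check, isIn_digit 5 '5' (by decide) check,
    isIn_digit 6 '6' (by decide) check, isIn_digit 7 '7' (by decide) check,
    isIn_digit 8 '8' (by decide) check, isIn_digit 9 '9' (by decide) check]
  have hs : ("0123456789".toList) = ['0','1','2','3','4','5','6','7','8','9'] := by decide
  rw [hs]
  simp [List.any_cons]

theorem table_getD (a b c : Bool × String) (t : String) :
    (PySem.Dict.ofList [("space", a), ("numerical", b), ("numb", c)]).getD t (false, "") =
    if t = "numb" then c else if t = "numerical" then b else if t = "space" then a else (false, "") := by
  simp [PySem.Dict.ofList, PySem.Dict.update, PySem.Dict.getD_insert, PySem.Dict.getD_empty,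
    List.foldl]

-- ===== VERDICT (by name: the statement is the Claim_ definition above) =====
theorem error_py_spec : Claim_equal_error_py := by
  intro type check _
  unfold Spec_error_py error_py error_py_alt
  simp only [flags_eq, Bool.false_or, table_getD]
  have h1 : PySem.Str.isIn " " check = check.toList.contains ' ' := by
    have := isIn_singleton ' ' check
    simpa using this
  by_cases hs : type = "space"
  · subst hs
    simp only [beq_iff_eq, reduceIte, h1]
    cases h : check.toList.contains ' ' <;> simp
  · by_cases hn : type = "numerical"
    · subst hn
      simp only [beq_iff_eq, reduceIte]
      cases h : check.toList.any (fun c => ("0123456789".toList).contains c)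
      · simp [numerical_branch, h]
        intro x hx
        have h2 := List.any_eq_false.mp h x hx
        simp at h2
        tauto
      · simp [numerical_branch, h]
        obtain ⟨x, hx, h2⟩ := List.any_eq_true.mp h
        refine ⟨x, hx, ?_⟩
        simp at h2
        tauto
    · by_cases hb : type = "numb"
      · subst hb
        simp only [beq_iff_eq, reduceIte, bIsInt]
        cases h : PySem.Int.ofStr? check <;> simp [h]
      · simp [hs, hn, hb]
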